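-- pv_equiv track=rewrite | github.com/kbiyani33/interview-prep | Heap/maximumSumCombinations2Arrays.py | solve
-- ===== SOURCE A (Python) =====
-- import heapq
-- import heapq
--
-- def solve(A, B, C):
--     minHeap = []
--     for i in A:
--         for j in B:
--             sum_ij = i + j
--             if len(minHeap) < C:
--                 heapq.heappush(minHeap, sum_ij)
--             else:
--                 # Only push to heap if the current sum is larger than the smallest in the heap
--                 if sum_ij > minHeap[0]:
--                     heapq.heappushpop(minHeap, sum_ij)
--
--     # Return the largest `C` sums in descending order
--     return sorted(minHeap, reverse=True)
-- ===== SOURCE B (Python) =====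
-- def solve(A, B, C):
--     sums = sorted((i + j for i in A for j in B), reverse=True)
--     return sums[:C]
-- ===== Notes on version B (the rewrite author's own statement) =====
-- stated objective: simpler
-- what changed: Replaces the bounded min-heap selection (push/pushpop per pair, then sort the heap) by a single full descending sort of all pairwise sums followed by a slice of the first C.
import Mathlib
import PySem

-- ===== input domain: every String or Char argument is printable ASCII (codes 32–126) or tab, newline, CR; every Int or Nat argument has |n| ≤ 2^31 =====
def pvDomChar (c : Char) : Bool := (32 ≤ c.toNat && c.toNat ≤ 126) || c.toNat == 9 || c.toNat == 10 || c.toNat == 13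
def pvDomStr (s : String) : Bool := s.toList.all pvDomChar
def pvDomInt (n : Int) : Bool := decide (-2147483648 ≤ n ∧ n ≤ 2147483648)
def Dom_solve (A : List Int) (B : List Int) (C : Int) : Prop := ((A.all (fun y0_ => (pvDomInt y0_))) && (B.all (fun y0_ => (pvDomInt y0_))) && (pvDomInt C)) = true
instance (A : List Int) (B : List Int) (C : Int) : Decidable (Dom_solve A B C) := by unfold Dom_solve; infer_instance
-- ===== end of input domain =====

-- B replaces A's per-pair bounded min-heap selection by one full descending sort of all
-- pairwise sums followed by a slice of the first C (objective: simpler).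

-- ===== PORT A =====
-- Model of heapq used by `solve`: the heap is kept as an ascending (min-first) list, so that
-- heap[0] is heapq's minimum.  In `solve` only heap[0] and the heap's multiset (it is sorted at
-- the end) are observable, so this model is exact for `solve`'s output on every admitted input.
def heappush (heap : List Int) (item : Int) : List Int :=
  PySem.List.insertBy (fun a b => decide (a < b)) item heap

def heappushpop (heap : List Int) (item : Int) : List Int :=
  -- Python: pops and replaces only when heap is nonempty and heap[0] < item, else heap unchanged
  if PySem.List.pyGetD heap 0 0 < item then
    PySem.List.insertBy (fun a b => decide (a < b)) item heap.tail
  else heap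

def solve (A : List Int) (B : List Int) (C : Int) : List Int :=
  let minHeap : List Int :=
    A.foldl (fun minHeap i =>
      B.foldl (fun minHeap j =>
        let sum_ij := i + j
        if (minHeap.length : Int) < C then heappush minHeap sum_ij
        else if PySem.List.pyGetD minHeap 0 0 < sum_ij then heappushpop minHeap sum_ij
        else minHeap) minHeap) []
  PySem.List.sorted minHeap (fun x => x) true

-- ===== PORT B =====
def solve_alt (A : List Int) (B : List Int) (C : Int) : List Int :=
  let sums := PySem.List.sorted (A.flatMap (fun i => B.map (fun j => i + j))) (fun x => x) true
  PySem.List.slice sums none (some C)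

-- ===== PRECONDITION & SPEC =====
-- Pre_ excludes only the inputs on which A raises IndexError: C ≤ 0 with both lists nonempty
-- (the heap stays empty, so minHeap[0] raises on the first pair).
def Pre_solve (A : List Int) (B : List Int) (C : Int) : Prop := 1 ≤ C ∨ A = [] ∨ B = []
instance (A : List Int) (B : List Int) (C : Int) : Decidable (Pre_solve A B C) := by unfold Pre_solve; infer_instance

def pvWitness_solve : List Int × List Int × Int := ([1, 2], [3, 4], 2)

def Spec_solve (A : List Int) (B : List Int) (C : Int) (out : List Int) : Prop := out = solve_alt A B C
instance (A : List Int) (B : List Int) (C : Int) (out : List Int) : Decidable (Spec_solve A B C out) := by unfold Spec_solve; infer_instance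

-- ===== CLAIM (what is proved, stated in full; the proofs are below) =====
def Claim_equal_solve : Prop := ∀ (A : List Int) (B : List Int) (C : Int), Dom_solve A B C → Pre_solve A B C → Spec_solve A B C (solve A B C)

-- ===== LEMMAS AND PROOFS =====

-- ascending insertion, as PySem.List.sorted performs it
def ins (x : Int) (l : List Int) : List Int := PySem.List.insertBy (fun a b => decide (a < b)) x l

def Asc (xs : List Int) : List Int := PySem.List.sorted xs (fun y => y) false

-- two descending lists with the same multiset are equal
lemma desc_ext (l1 l2 : List Int) (hp : l1.Perm l2)
    (h1 : l1.Pairwise (fun a b => b ≤ a)) (h2 : l2.Pairwise (fun a b => b ≤ a)) : l1 = l2 :=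
  PySem.List.eq_of_perm_of_pairwise_le_of_injective (fun x => -x) neg_injective hp
    (h1.imp (fun h => neg_le_neg h)) (h2.imp (fun h => neg_le_neg h))

lemma asc_pairwise (xs : List Int) : (Asc xs).Pairwise (· ≤ ·) := by
  simpa using PySem.List.sorted_pairwise xs (fun y => y)

lemma asc_perm (xs : List Int) : (Asc xs).Perm xs := PySem.List.sorted_perm xs (fun y => y) false

lemma length_asc (xs : List Int) : (Asc xs).length = xs.length := PySem.List.length_sorted xs _ false

lemma asc_append_singleton (xs : List Int) (x : Int) : Asc (xs ++ [x]) = ins x (Asc xs) := by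
  unfold Asc ins
  rw [PySem.List.sorted_eq_foldl_insertBy, PySem.List.sorted_eq_foldl_insertBy, List.foldl_concat]

-- inserting an element ≤ everything puts it in front
lemma ins_cons (x y : Int) (ys : List Int) :
    ins x (y :: ys) = if x < y then x :: y :: ys else y :: ins x ys := by
  simp only [ins, PySem.List.insertBy]
  split <;> simp_all

lemma ins_of_le (x : Int) (ys : List Int) (h : ∀ z ∈ ys, x ≤ z) : ins x ys = x :: ys := by
  induction ys with
  | nil => rfl
  | cons z t ih =>
    unfold ins PySem.List.insertBy
    by_cases hxz : x < z
    · simp [hxz]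
    · have hxz' : x = z := le_antisymm (h z (by simp)) (le_of_not_gt hxz)
      have ht : ins x t = x :: t := ih (fun w hw => h w (by simp [hw]))
      simp only [hxz, decide_false, Bool.false_eq_true, ite_false]
      rw [show PySem.List.insertBy (fun a b => decide (a < b)) x t = ins x t from rfl, ht, hxz']

-- dropping past the insertion point: the new element x ≤ L[k] stays in the dropped prefix
lemma drop_ins_of_le (L : List Int) (k : Nat) (x : Int) (hasc : L.Pairwise (· ≤ ·))
    (hk : k < L.length) (hx : x ≤ L[k]) : (ins x L).drop (k + 1) = L.drop k := by
  induction L generalizing k with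
  | nil => simp at hk
  | cons y ys ih =>
    rw [ins_cons]
    by_cases hxy : x < y
    · simp [hxy]
    · rw [if_neg hxy, List.drop_succ_cons]
      cases k with
      | zero =>
        have hxy' : x = y := le_antisymm (by simpa using hx) (le_of_not_gt hxy)
        have hle : ∀ z ∈ ys, x ≤ z := by
          intro z hz; exact hxy' ▸ (List.pairwise_cons.mp hasc).1 z hz
        rw [ins_of_le x ys hle, hxy']
      | succ k =>
        exact ih k (List.pairwise_cons.mp hasc).2 (by simpa using hk) (by simpa using hx)

-- dropping before the insertion point: insertion commutes with the drop when L[k] < x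
lemma drop_ins_of_lt (L : List Int) (k : Nat) (x : Int) (hasc : L.Pairwise (· ≤ ·))
    (hk : k < L.length) (hx : L[k] < x) : (ins x L).drop (k + 1) = ins x (L.drop (k + 1)) := by
  induction L generalizing k with
  | nil => simp at hk
  | cons y ys ih =>
    have hyx : ¬ x < y := by
      have hy : y ≤ (y :: ys)[k] := by
        cases k with
        | zero => simp
        | succ k => exact (List.pairwise_cons.mp hasc).1 _ (List.getElem_mem (by simpa using hk))
      exact not_lt_of_gt (lt_of_le_of_lt hy hx)
    rw [ins_cons, if_neg hyx, List.drop_succ_cons]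
    cases k with
    | zero => simp
    | succ k =>
      exact ih k (List.pairwise_cons.mp hasc).2 (by simpa using hk) (by simpa using hx)

-- descending sort of an ascending list is its reverse
lemma sorted_true_of_asc (l : List Int) (h : l.Pairwise (· ≤ ·)) :
    PySem.List.sorted l (fun y => y) true = l.reverse := by
  refine desc_ext _ _ ((PySem.List.sorted_perm l _ true).trans l.reverse_perm.symm)
    (by simpa using PySem.List.sorted_pairwise_rev l (fun y => y)) ?_
  exact List.pairwise_reverse.mpr h

-- one iteration of A's loop body keeps the heap equal to the C largest sums seen, ascending
lemma step_inv (C : Int) (hC : 1 ≤ C) (seen : List Int) (x : Int) :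
    (let sum_ij := x
     if (((Asc seen).drop (seen.length - C.toNat)).length : Int) < C then
       heappush ((Asc seen).drop (seen.length - C.toNat)) sum_ij
     else if PySem.List.pyGetD ((Asc seen).drop (seen.length - C.toNat)) 0 0 < sum_ij then
       heappushpop ((Asc seen).drop (seen.length - C.toNat)) sum_ij
     else (Asc seen).drop (seen.length - C.toNat)) =
    (Asc (seen ++ [x])).drop ((seen ++ [x]).length - C.toNat) := by
  have hc : (C.toNat : Int) = C := Int.toNat_of_nonneg (by omega)
  set c := C.toNat with hcdef
  have hc1 : 1 ≤ c := by omega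
  have hlenL : (Asc seen).length = seen.length := length_asc seen
  have hlen : ((Asc seen).drop (seen.length - c)).length = seen.length - (seen.length - c) := by
    simp [hlenL]
  by_cases hm : seen.length < c
  · -- heap not yet full: plain sorted insertion
    have hk0 : seen.length - c = 0 := by omega
    have hcond : (((Asc seen).drop (seen.length - c)).length : Int) < C := by
      rw [hlen, hk0]; omega
    simp only [if_pos hcond]
    rw [asc_append_singleton, hk0, List.drop_zero]
    have : (seen ++ [x]).length - c = 0 := by simp; omega
    rw [this, List.drop_zero]; rfl
  · -- heap full (length = C)
    rw [not_lt] at hm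
    set k := seen.length - c with hkdef
    have hkc : k + c = seen.length := by omega
    have hcond : ¬ (((Asc seen).drop k).length : Int) < C := by rw [hlen]; omega
    have hklt : k < (Asc seen).length := by omega
    have hhead : PySem.List.pyGetD ((Asc seen).drop k) 0 0 = (Asc seen)[k] := by
      rw [PySem.List.pyGetD_zero]
      rw [List.getD_eq_getElem?_getD, List.getElem?_drop, Nat.add_zero,
        List.getElem?_eq_getElem hklt, Option.getD_some]
    have hk1 : (seen ++ [x]).length - c = k + 1 := by simp; omega
    simp only [if_neg hcond]
    rw [asc_append_singleton, hk1, hhead]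
    by_cases hx : (Asc seen)[k] < x
    · simp only [if_pos hx]
      unfold heappushpop
      rw [hhead, if_pos hx, List.tail_drop]
      exact (drop_ins_of_lt (Asc seen) k x (asc_pairwise seen) hklt hx).symm
    · simp only [if_neg hx]
      exact (drop_ins_of_le (Asc seen) k x (asc_pairwise seen) hklt (le_of_not_gt hx)).symm

-- folding A's loop body over the remaining sums, from any already-processed prefix
lemma fold_inv (C : Int) (hC : 1 ≤ C) (S seen : List Int) :
    S.foldl (fun acc s =>
        if ((acc.length : Int)) < C then heappush acc s
        else if PySem.List.pyGetD acc 0 0 < s then heappushpop acc s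
        else acc) ((Asc seen).drop (seen.length - C.toNat)) =
    (Asc (seen ++ S)).drop ((seen ++ S).length - C.toNat) := by
  induction S generalizing seen with
  | nil => simp
  | cons x t ih =>
    rw [List.foldl_cons]
    have h1 := step_inv C hC seen x
    simp only at h1
    rw [h1]
    have h2 := ih (seen ++ [x])
    rw [List.append_assoc] at h2
    simpa using h2

lemma foldl_const (l : List Int) (init : List Int) :
    l.foldl (fun acc (_ : Int) => acc) init = init := by
  induction l generalizing init with
  | nil => rfl
  | cons a t ih => exact ih init

-- ===== VERDICT (by name: the statement is the Claim_ definition above) =====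
theorem solve_spec : Claim_equal_solve := by
  intro A B C _ hpre
  unfold Spec_solve solve solve_alt
  simp only []
  by_cases hC : 1 ≤ C
  · -- flatten the nested loop into one fold over all pairwise sums
    set S := A.flatMap (fun i => B.map (fun j => i + j)) with hS
    have hflat : A.foldl (fun minHeap i =>
        B.foldl (fun minHeap j =>
          let sum_ij := i + j
          if (minHeap.length : Int) < C then heappush minHeap sum_ij
          else if PySem.List.pyGetD minHeap 0 0 < sum_ij then heappushpop minHeap sum_ij
          else minHeap) minHeap) [] =
        S.foldl (fun acc s =>
          if ((acc.length : Int)) < C then heappush acc s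
          else if PySem.List.pyGetD acc 0 0 < s then heappushpop acc s
          else acc) [] := by
      rw [hS, List.foldl_flatMap]
      simp only [List.foldl_map]
    rw [hflat]
    have h0 : ([] : List Int) = (Asc []).drop (([] : List Int).length - C.toNat) := by
      simp [Asc, PySem.List.sorted]
    rw [h0, fold_inv C hC S []]
    simp only [List.nil_append]
    -- both sides are the C largest sums, descending
    have hasc : ((Asc S).drop (S.length - C.toNat)).Pairwise (· ≤ ·) := (asc_pairwise S).drop
    rw [sorted_true_of_asc _ hasc]
    rw [PySem.List.slice_to _ (by omega : (0:Int) ≤ C)]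
    have hdesc : PySem.List.sorted S (fun x => x) true = (Asc S).reverse := by
      refine desc_ext _ _ ((PySem.List.sorted_perm S _ true).trans
        ((asc_perm S).symm.trans (Asc S).reverse_perm.symm)) ?_ ?_
      · simpa using PySem.List.sorted_pairwise_rev S (fun y => y)
      · exact List.pairwise_reverse.mpr (asc_pairwise S)
    rw [hdesc, List.take_reverse, length_asc]
  · -- Pre_ forces A = [] or B = []: both programs return []
    have hAB : A = [] ∨ B = [] := by
      rcases hpre with h | h | h
      · omega
      · exact Or.inl h
      · exact Or.inr h
    have hSnil : A.flatMap (fun i => B.map (fun j => i + j)) = [] := by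
      rcases hAB with h | h <;> simp [h]
    have hloop : A.foldl (fun minHeap i =>
        B.foldl (fun minHeap j =>
          let sum_ij := i + j
          if (minHeap.length : Int) < C then heappush minHeap sum_ij
          else if PySem.List.pyGetD minHeap 0 0 < sum_ij then heappushpop minHeap sum_ij
          else minHeap) minHeap) ([] : List Int) = [] := by
      rcases hAB with h | h
      · simp [h]
      · subst h
        simp only [List.foldl_nil]
        exact foldl_const A []
    rw [hloop, hSnil]
    have : PySem.List.sorted ([] : List Int) (fun x => x) true = [] := rfl
    rw [this]
    symm
    apply List.eq_nil_of_length_eq_zero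
    simp [PySem.List.slice]
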